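-- pv_equiv track=rewrite | github.com/2223-ENSEA-Stage-1A/KicadAutomatisation | Code test website and script/website zfinished v4/myproject/myapp/myscripts/checkThisProject.py | handle_erc_result
-- ===== SOURCE A (Python) =====
-- def handle_erc_result(input):
--     warnings = []
--     warning = False
--     errors = []
--     error = False
--     for line in input:
--         if line.startswith("WARNING") and "W058" in line:
--             error = False
--             warnings.append(line)
--             warning = True
--         elif warning and line.strip().startswith("@"):
--             warnings[-1] = warnings[-1] + line
--         elif line.startswith("ERROR"):
--             warning = False
--             errors.append(line)
--             error = True
--         elif error and line.strip().startswith("@"):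
--             errors[-1] = errors[-1] + line
--         else:
--             error = False
--             warning = False
--     return warning, warnings, error, errors
-- ===== SOURCE B (Python) =====
-- def handle_erc_result(input):
--     lines = list(input)
--     n = len(lines)
--     warnings = []
--     errors = []
--     warning = False
--     error = False
--     i = 0
--     while i < n:
--         line = lines[i]
--         if line.startswith("WARNING") and "W058" in line:
--             warning, error = True, False
--             buf = line
--             i += 1
--             while i < n and lines[i].strip().startswith("@"):
--                 buf += lines[i]
--                 i += 1
--             warnings.append(buf)
--         elif line.startswith("ERROR"):
--             warning, error = False, True
--             buf = line
--             i += 1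
--             while i < n and lines[i].strip().startswith("@"):
--                 buf += lines[i]
--                 i += 1
--             errors.append(buf)
--         else:
--             warning = error = False
--             i += 1
--     return warning, warnings, error, errors
-- ===== Notes on version B (the rewrite author's own statement) =====
-- stated objective: alternative
-- what changed: Replaces the flag-driven per-line state machine with an index-based block scanner: each WARNING/ERROR header line immediately consumes its '@'-continuation lines in an inner loop and appends the joined block once, instead of threading warning/error booleans through every iteration.
import Mathlib
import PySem

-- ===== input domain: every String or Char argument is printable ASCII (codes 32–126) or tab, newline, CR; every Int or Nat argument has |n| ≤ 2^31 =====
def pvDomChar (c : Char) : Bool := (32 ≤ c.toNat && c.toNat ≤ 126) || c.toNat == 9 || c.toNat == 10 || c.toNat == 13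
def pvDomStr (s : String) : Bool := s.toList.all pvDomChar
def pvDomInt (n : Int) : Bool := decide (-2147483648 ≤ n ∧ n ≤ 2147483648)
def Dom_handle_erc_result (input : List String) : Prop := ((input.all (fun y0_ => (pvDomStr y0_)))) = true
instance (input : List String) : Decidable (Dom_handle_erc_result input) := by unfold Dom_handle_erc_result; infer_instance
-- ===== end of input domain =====

-- B replaces A's flag-driven per-line state machine by an index/block scanner that consumes
-- each header's '@'-continuation lines in an inner loop; same return value, similar cost.


-- ===== PORT A =====
-- one iteration of A's for-loop on the state (warning, warnings, error, errors)
def ercStepA (st : Bool × List String × Bool × List String) (line : String) :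
    Bool × List String × Bool × List String :=
  let (warning, warnings, error, errors) := st
  if PySem.Str.startswith line "WARNING" && PySem.Str.isIn "W058" line then
    (true, warnings ++ [line], false, errors)
  else if warning && PySem.Str.startswith (PySem.Str.strip line) "@" then
    -- warnings[-1] = warnings[-1] + line (warning = True guarantees warnings ≠ [])
    (warning, warnings.dropLast ++ [warnings.getLastD "" ++ line], error, errors)
  else if PySem.Str.startswith line "ERROR" then
    (false, warnings, true, errors ++ [line])
  else if error && PySem.Str.startswith (PySem.Str.strip line) "@" then
    (warning, warnings, error, errors.dropLast ++ [errors.getLastD "" ++ line])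
  else
    (false, warnings, false, errors)

def handle_erc_result (input : List String) : Bool × List String × Bool × List String :=
  input.foldl ercStepA (false, [], false, [])

-- ===== PORT B =====
-- the inner while loop: consume following '@'-continuation lines into buf, return (buf, rest)
def ercConsume (buf : String) : List String → String × List String
  | [] => (buf, [])
  | l :: ls =>
    if PySem.Str.startswith (PySem.Str.strip l) "@" then ercConsume (buf ++ l) ls
    else (buf, l :: ls)

theorem ercConsume_length_le (buf : String) (ls : List String) :
    (ercConsume buf ls).2.length ≤ ls.length := by
  induction ls generalizing buf with
  | nil => simp [ercConsume]
  | cons l ls ih =>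
    simp only [ercConsume]
    split
    · exact le_trans (ih _) (Nat.le_succ _)
    · simp

-- the outer while loop of B (warning/error flags are determined by which branch ends the input)
def ercGo (warnings errors : List String) : List String → Bool × List String × Bool × List String
  | [] => (false, warnings, false, errors)
  | line :: ls =>
    if PySem.Str.startswith line "WARNING" && PySem.Str.isIn "W058" line then
      match h : ercConsume line ls with
      | (buf, []) => (true, warnings ++ [buf], false, errors)
      | (buf, r :: rs) => ercGo (warnings ++ [buf]) errors (r :: rs)
    else if PySem.Str.startswith line "ERROR" then
      match h : ercConsume line ls with
      | (buf, []) => (false, warnings, true, errors ++ [buf])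
      | (buf, r :: rs) => ercGo warnings (errors ++ [buf]) (r :: rs)
    else
      ercGo warnings errors ls
termination_by ls => ls.length
decreasing_by
  · have := ercConsume_length_le line ls; rw [h] at this; simpa using Nat.lt_succ_of_le this
  · have := ercConsume_length_le line ls; rw [h] at this; simpa using Nat.lt_succ_of_le this
  · simp

def handle_erc_result_alt (input : List String) : Bool × List String × Bool × List String :=
  ercGo [] [] input

-- ===== PRECONDITION & SPEC =====
def Spec_handle_erc_result (input : List String) (out : Bool × List String × Bool × List String) : Prop := out = handle_erc_result_alt input
instance (input : List String) (out : Bool × List String × Bool × List String) : Decidable (Spec_handle_erc_result input out) := by unfold Spec_handle_erc_result; infer_instance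

-- ===== CLAIM (what is proved, stated in full; the proofs are below) =====
def Claim_equal_handle_erc_result : Prop := ∀ (input : List String), Dom_handle_erc_result input → Spec_handle_erc_result input (handle_erc_result input)

-- ===== LEMMAS AND PROOFS =====

-- stripping a string that starts with a non-space character keeps that character in front
theorem strip_cons_of_not_space (c : Char) (cs : List Char) (hc : PySem.Chars.isspace c = false) :
    ∃ t, PySem.Chars.strip (c :: cs) = c :: t := by
  simp only [PySem.Chars.strip, PySem.Chars.lstrip, PySem.Chars.rstrip,
    List.dropWhile_cons, hc, Bool.false_eq_true, if_false, List.reverse_cons,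
    List.dropWhile_append]
  by_cases h : (List.dropWhile PySem.Chars.isspace cs.reverse).isEmpty
  · exact ⟨[], by simp [h]⟩
  · exact ⟨(List.dropWhile PySem.Chars.isspace cs.reverse).reverse, by simp [h]⟩

-- a line starting with a non-space, non-'@' character cannot strip to an '@'-continuation
theorem not_at_of_head (c : Char) (cs : List Char) (hc : PySem.Chars.isspace c = false)
    (hne : c ≠ '@') :
    PySem.Chars.startswith (PySem.Chars.strip (c :: cs)) ['@'] = false := by
  obtain ⟨t, ht⟩ := strip_cons_of_not_space c cs hc
  rw [ht]
  simp [PySem.Chars.startswith, List.isPrefixOf, Ne.symm hne]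

theorem not_at_of_startswith (l : String) (c : Char) (p : List Char)
    (hp : PySem.Chars.startswith l.toList (c :: p) = true)
    (hc : PySem.Chars.isspace c = false) (hne : c ≠ '@') :
    PySem.Chars.startswith (PySem.Chars.strip l.toList) ['@'] = false := by
  obtain ⟨t, ht⟩ := List.isPrefixOf_iff_prefix.mp hp
  rw [← ht, List.cons_append]
  exact not_at_of_head c (p ++ t) hc hne

-- on a non-continuation line, a stale warning/error flag is irrelevant to A's step
theorem ercStepA_flags (w e : Bool) (ws es : List String) (l : String)
    (h : PySem.Chars.startswith (PySem.Chars.strip l.toList) ['@'] = false) :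
    ercStepA (w, ws, e, es) l = ercStepA (false, ws, false, es) l := by
  simp [ercStepA, h]

-- A's loop from a live-warning state whose last warning is `init` = B's inner consume loop
theorem ercFold_warning (ls : List String) (init : String) (ws es : List String) :
    ls.foldl ercStepA (true, ws ++ [init], false, es) =
      match ercConsume init ls with
      | (buf, []) => (true, ws ++ [buf], false, es)
      | (buf, r :: rs) => (r :: rs).foldl ercStepA (false, ws ++ [buf], false, es) := by
  induction ls generalizing init with
  | nil => simp [ercConsume]
  | cons l ls ih =>
    by_cases hat : PySem.Chars.startswith (PySem.Chars.strip l.toList) ['@'] = true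
    · have hW : PySem.Chars.startswith l.toList ['W', 'A', 'R', 'N', 'I', 'N', 'G'] = false := by
        by_contra h
        rw [Bool.not_eq_false] at h
        rw [not_at_of_startswith l 'W' _ h (by decide) (by decide)] at hat
        exact Bool.false_ne_true hat
      have step : ercStepA (true, ws ++ [init], false, es) l =
          (true, ws ++ [init ++ l], false, es) := by
        simp [ercStepA, hW, hat]
      have cons : ercConsume init (l :: ls) = ercConsume (init ++ l) ls := by
        simp [ercConsume, hat]
      rw [List.foldl_cons, step, cons]
      exact ih (init ++ l)
    · rw [Bool.not_eq_true] at hat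
      have cons : ercConsume init (l :: ls) = (init, l :: ls) := by
        simp [ercConsume, hat]
      rw [List.foldl_cons, ercStepA_flags true false (ws ++ [init]) es l hat, cons]
      rfl

-- symmetric lemma for the error side
theorem ercFold_error (ls : List String) (init : String) (ws es : List String) :
    ls.foldl ercStepA (false, ws, true, es ++ [init]) =
      match ercConsume init ls with
      | (buf, []) => (false, ws, true, es ++ [buf])
      | (buf, r :: rs) => (r :: rs).foldl ercStepA (false, ws, false, es ++ [buf]) := by
  induction ls generalizing init with
  | nil => simp [ercConsume]
  | cons l ls ih =>
    by_cases hat : PySem.Chars.startswith (PySem.Chars.strip l.toList) ['@'] = true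
    · have hW : PySem.Chars.startswith l.toList ['W', 'A', 'R', 'N', 'I', 'N', 'G'] = false := by
        by_contra h
        rw [Bool.not_eq_false] at h
        rw [not_at_of_startswith l 'W' _ h (by decide) (by decide)] at hat
        exact Bool.false_ne_true hat
      have hE : PySem.Chars.startswith l.toList ['E', 'R', 'R', 'O', 'R'] = false := by
        by_contra h
        rw [Bool.not_eq_false] at h
        rw [not_at_of_startswith l 'E' _ h (by decide) (by decide)] at hat
        exact Bool.false_ne_true hat
      have step : ercStepA (false, ws, true, es ++ [init]) l =
          (false, ws, true, es ++ [init ++ l]) := by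
        simp [ercStepA, hW, hE, hat]
      have cons : ercConsume init (l :: ls) = ercConsume (init ++ l) ls := by
        simp [ercConsume, hat]
      rw [List.foldl_cons, step, cons]
      exact ih (init ++ l)
    · rw [Bool.not_eq_true] at hat
      have cons : ercConsume init (l :: ls) = (init, l :: ls) := by
        simp [ercConsume, hat]
      rw [List.foldl_cons, ercStepA_flags false true ws (es ++ [init]) l hat, cons]
      rfl

-- unfolding ercGo one step, with the dependent match replaced by a plain one
theorem ercGo_cons_W (ws es : List String) (l : String) (ls : List String)
    (hW : (PySem.Str.startswith l "WARNING" && PySem.Str.isIn "W058" l) = true) :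
    ercGo ws es (l :: ls) =
      match ercConsume l ls with
      | (buf, []) => (true, ws ++ [buf], false, es)
      | (buf, r :: rs) => ercGo (ws ++ [buf]) es (r :: rs) := by
  rw [ercGo]
  simp only [hW, if_true]
  cases ercConsume l ls with
  | mk buf rest => cases rest <;> rfl

theorem ercGo_cons_E (ws es : List String) (l : String) (ls : List String)
    (hW : (PySem.Str.startswith l "WARNING" && PySem.Str.isIn "W058" l) = false)
    (hE : PySem.Str.startswith l "ERROR" = true) :
    ercGo ws es (l :: ls) =
      match ercConsume l ls with
      | (buf, []) => (false, ws, true, es ++ [buf])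
      | (buf, r :: rs) => ercGo ws (es ++ [buf]) (r :: rs) := by
  rw [ercGo]
  simp only [hW, Bool.false_eq_true, if_false, hE, if_true]
  cases ercConsume l ls with
  | mk buf rest => cases rest <;> rfl

theorem ercGo_cons_other (ws es : List String) (l : String) (ls : List String)
    (hW : (PySem.Str.startswith l "WARNING" && PySem.Str.isIn "W058" l) = false)
    (hE : PySem.Str.startswith l "ERROR" = false) :
    ercGo ws es (l :: ls) = ercGo ws es ls := by
  rw [ercGo]
  simp only [hW, hE, Bool.false_eq_true, if_false]

-- the main invariant: A's fold from a clean-flags state equals B's scanner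
theorem ercFold_eq_go (ls : List String) (ws es : List String) :
    ls.foldl ercStepA (false, ws, false, es) = ercGo ws es ls := by
  induction hn : ls.length using Nat.strong_induction_on generalizing ls ws es with
  | _ n ih =>
  cases ls with
  | nil => simp [ercGo]
  | cons l ls =>
    subst hn
    by_cases hW : (PySem.Str.startswith l "WARNING" && PySem.Str.isIn "W058" l) = true
    · have step : ercStepA (false, ws, false, es) l = (true, ws ++ [l], false, es) := by
        simp only [ercStepA, hW, if_true]
      rw [List.foldl_cons, step, ercFold_warning ls l ws es, ercGo_cons_W ws es l ls hW]
      have hlen := ercConsume_length_le l ls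
      rcases hc : ercConsume l ls with ⟨buf, rest⟩
      rw [hc] at hlen
      cases rest with
      | nil => rfl
      | cons r rs =>
        exact ih (r :: rs).length (by simpa using Nat.lt_succ_of_le hlen) _ _ _ rfl
    · rw [Bool.not_eq_true] at hW
      by_cases hE : PySem.Str.startswith l "ERROR" = true
      · have step : ercStepA (false, ws, false, es) l = (false, ws, true, es ++ [l]) := by
          simp only [ercStepA, hW, Bool.false_eq_true, if_false, Bool.false_and, hE, if_true]
        rw [List.foldl_cons, step, ercFold_error ls l ws es, ercGo_cons_E ws es l ls hW hE]
        have hlen := ercConsume_length_le l ls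
        rcases hc : ercConsume l ls with ⟨buf, rest⟩
        rw [hc] at hlen
        cases rest with
        | nil => rfl
        | cons r rs =>
          exact ih (r :: rs).length (by simpa using Nat.lt_succ_of_le hlen) _ _ _ rfl
      · rw [Bool.not_eq_true] at hE
        have step : ercStepA (false, ws, false, es) l = (false, ws, false, es) := by
          simp only [ercStepA, hW, hE, Bool.false_eq_true, if_false, Bool.false_and]
        rw [List.foldl_cons, step, ercGo_cons_other ws es l ls hW hE]
        exact ih ls.length (Nat.lt_succ_self _) _ _ _ rfl

-- ===== VERDICT (by name: the statement is the Claim_ definition above) =====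
theorem handle_erc_result_spec : Claim_equal_handle_erc_result := by
  intro input _
  unfold Spec_handle_erc_result handle_erc_result handle_erc_result_alt
  exact ercFold_eq_go input [] []
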